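-- pv_equiv track=rewrite | github.com/CoderMayne/GravelDonkey.ai---Ultimate-One-Click-AI-Environment-and-Application-Installer | GravelDonkey.ai---Ultimate-One-Click-AI-Environment-and-Application-Installer/enhanced_hardware_detector.py | _get_gpu_architecture
-- ===== SOURCE A (Python) =====
-- def _get_gpu_architecture(gpu_name):
--     """Determine GPU architecture from name for optimization recommendations."""
--     gpu_name_lower = gpu_name.lower()
--
--     # NVIDIA architectures
--     if any(x in gpu_name_lower for x in ['rtx 50', '5090', '5080', '5070', '5060']):
--         return "Blackwell", "sm_90"
--     elif any(x in gpu_name_lower for x in ['rtx 40', '4090', '4080', '4070', '4060']):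
--         return "Ada Lovelace", "sm_89"
--     elif any(x in gpu_name_lower for x in ['rtx 30', '3090', '3080', '3070', '3060']):
--         return "Ampere", "sm_86"
--     elif any(x in gpu_name_lower for x in ['rtx 20', '2080', '2070', '2060', 'titan rtx']):
--         return "Turing", "sm_75"
--     elif any(x in gpu_name_lower for x in ['gtx 16', '1660', '1650']):
--         return "Turing", "sm_75"
--     elif any(x in gpu_name_lower for x in ['gtx 10', '1080', '1070', '1060', '1050']):
--         return "Pascal", "sm_61"
--     elif any(x in gpu_name_lower for x in ['tesla v100']):
--         return "Volta", "sm_70"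
--     elif any(x in gpu_name_lower for x in ['tesla p100']):
--         return "Pascal", "sm_60"
--     elif any(x in gpu_name_lower for x in ['tesla k80', 'tesla k40']):
--         return "Kepler", "sm_37"
--     elif any(x in gpu_name_lower for x in ['h100', 'a100']):
--         return "Hopper/Ampere", "sm_90"
--
--     # AMD architectures
--     elif any(x in gpu_name_lower for x in ['rx 90', '9060', '9070']):
--         return "RDNA 4", "gfx1200"
--     elif any(x in gpu_name_lower for x in ['rx 7900', 'rx 7800', 'rx 7700', 'rx 7600']):
--         return "RDNA 3", "gfx1100"
--     elif any(x in gpu_name_lower for x in ['rx 6950', 'rx 6900', 'rx 6800', 'rx 6700', 'rx 6600', 'rx 6500']):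
--         return "RDNA 2", "gfx1030"
--     elif any(x in gpu_name_lower for x in ['rx 5700', 'rx 5600', 'rx 5500']):
--         return "RDNA", "gfx1010"
--     elif any(x in gpu_name_lower for x in ['vega 64', 'vega 56', 'radeon vii']):
--         return "GCN 5.0", "gfx900"
--
--     # Intel architectures
--     elif any(x in gpu_name_lower for x in ['arc b', 'b770', 'b750', 'b580', 'b380']):
--         return "Xe-HPG", "DG3"
--     elif any(x in gpu_name_lower for x in ['arc a770', 'arc a750', 'arc a580']):
--         return "Xe-HPG", "DG2"
--     elif any(x in gpu_name_lower for x in ['arc a380', 'arc a310']):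
--         return "Xe-HPG", "DG2"
--     elif 'iris xe' in gpu_name_lower:
--         return "Xe-LP", "Gen12"
--
--     return "Unknown", "unknown"
-- ===== SOURCE B (Python) =====
-- # Flat priority-ranked pattern list: earlier entries = higher priority (A's elif order).
-- _FLAT_PATTERNS = [
--     ('rtx 50', ("Blackwell", "sm_90")), ('5090', ("Blackwell", "sm_90")),
--     ('5080', ("Blackwell", "sm_90")), ('5070', ("Blackwell", "sm_90")),
--     ('5060', ("Blackwell", "sm_90")),
--     ('rtx 40', ("Ada Lovelace", "sm_89")), ('4090', ("Ada Lovelace", "sm_89")),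
--     ('4080', ("Ada Lovelace", "sm_89")), ('4070', ("Ada Lovelace", "sm_89")),
--     ('4060', ("Ada Lovelace", "sm_89")),
--     ('rtx 30', ("Ampere", "sm_86")), ('3090', ("Ampere", "sm_86")),
--     ('3080', ("Ampere", "sm_86")), ('3070', ("Ampere", "sm_86")),
--     ('3060', ("Ampere", "sm_86")),
--     ('rtx 20', ("Turing", "sm_75")), ('2080', ("Turing", "sm_75")),
--     ('2070', ("Turing", "sm_75")), ('2060', ("Turing", "sm_75")),
--     ('titan rtx', ("Turing", "sm_75")),
--     ('gtx 16', ("Turing", "sm_75")), ('1660', ("Turing", "sm_75")),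
--     ('1650', ("Turing", "sm_75")),
--     ('gtx 10', ("Pascal", "sm_61")), ('1080', ("Pascal", "sm_61")),
--     ('1070', ("Pascal", "sm_61")), ('1060', ("Pascal", "sm_61")),
--     ('1050', ("Pascal", "sm_61")),
--     ('tesla v100', ("Volta", "sm_70")),
--     ('tesla p100', ("Pascal", "sm_60")),
--     ('tesla k80', ("Kepler", "sm_37")), ('tesla k40', ("Kepler", "sm_37")),
--     ('h100', ("Hopper/Ampere", "sm_90")), ('a100', ("Hopper/Ampere", "sm_90")),
--     ('rx 90', ("RDNA 4", "gfx1200")), ('9060', ("RDNA 4", "gfx1200")),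
--     ('9070', ("RDNA 4", "gfx1200")),
--     ('rx 7900', ("RDNA 3", "gfx1100")), ('rx 7800', ("RDNA 3", "gfx1100")),
--     ('rx 7700', ("RDNA 3", "gfx1100")), ('rx 7600', ("RDNA 3", "gfx1100")),
--     ('rx 6950', ("RDNA 2", "gfx1030")), ('rx 6900', ("RDNA 2", "gfx1030")),
--     ('rx 6800', ("RDNA 2", "gfx1030")), ('rx 6700', ("RDNA 2", "gfx1030")),
--     ('rx 6600', ("RDNA 2", "gfx1030")), ('rx 6500', ("RDNA 2", "gfx1030")),
--     ('rx 5700', ("RDNA", "gfx1010")), ('rx 5600', ("RDNA", "gfx1010")),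
--     ('rx 5500', ("RDNA", "gfx1010")),
--     ('vega 64', ("GCN 5.0", "gfx900")), ('vega 56', ("GCN 5.0", "gfx900")),
--     ('radeon vii', ("GCN 5.0", "gfx900")),
--     ('arc b', ("Xe-HPG", "DG3")), ('b770', ("Xe-HPG", "DG3")),
--     ('b750', ("Xe-HPG", "DG3")), ('b580', ("Xe-HPG", "DG3")),
--     ('b380', ("Xe-HPG", "DG3")),
--     ('arc a770', ("Xe-HPG", "DG2")), ('arc a750', ("Xe-HPG", "DG2")),
--     ('arc a580', ("Xe-HPG", "DG2")),
--     ('arc a380', ("Xe-HPG", "DG2")), ('arc a310', ("Xe-HPG", "DG2")),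
--     ('iris xe', ("Xe-LP", "Gen12")),
-- ]
--
-- def _get_gpu_architecture(gpu_name):
--     """Collect ALL matching patterns, then pick the highest-priority (lowest-rank) one."""
--     name = gpu_name.lower()
--     matches = [(rank, result) for rank, (pattern, result) in enumerate(_FLAT_PATTERNS)
--                if pattern in name]
--     if not matches:
--         return "Unknown", "unknown"
--     return min(matches, key=lambda m: m[0])[1]
-- ===== Notes on version B (the rewrite author's own statement) =====
-- stated objective: alternative
-- what changed: Instead of a 19-branch first-match elif chain, B flattens all 63 patterns into one priority-ranked list, collects ALL patterns occurring in the name in a single comprehension, and then selects the result of the minimum-rank match (min with key), defaulting to Unknown.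
import Mathlib
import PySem

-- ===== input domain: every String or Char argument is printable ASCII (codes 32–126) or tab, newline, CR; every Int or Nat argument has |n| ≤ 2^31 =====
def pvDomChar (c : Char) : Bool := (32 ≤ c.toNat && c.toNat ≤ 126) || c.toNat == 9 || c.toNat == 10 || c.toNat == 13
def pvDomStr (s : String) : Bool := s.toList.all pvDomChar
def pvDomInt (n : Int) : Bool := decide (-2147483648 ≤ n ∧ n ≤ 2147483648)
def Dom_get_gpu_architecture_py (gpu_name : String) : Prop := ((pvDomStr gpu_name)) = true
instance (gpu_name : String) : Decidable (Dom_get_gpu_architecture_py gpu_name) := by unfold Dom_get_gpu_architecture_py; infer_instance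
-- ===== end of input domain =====

-- B replaces A's first-match elif chain by collecting ALL matching patterns from one flat
-- priority-ranked list and taking the minimum-rank match (alternative decomposition, same cost).

-- ===== PORT A =====
def get_gpu_architecture_py (gpu_name : String) : String × String :=
  let nl := PySem.Str.lower gpu_name
  if ["rtx 50", "5090", "5080", "5070", "5060"].any (fun x => PySem.Str.isIn x nl) then ("Blackwell", "sm_90")
  else if ["rtx 40", "4090", "4080", "4070", "4060"].any (fun x => PySem.Str.isIn x nl) then ("Ada Lovelace", "sm_89")
  else if ["rtx 30", "3090", "3080", "3070", "3060"].any (fun x => PySem.Str.isIn x nl) then ("Ampere", "sm_86")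
  else if ["rtx 20", "2080", "2070", "2060", "titan rtx"].any (fun x => PySem.Str.isIn x nl) then ("Turing", "sm_75")
  else if ["gtx 16", "1660", "1650"].any (fun x => PySem.Str.isIn x nl) then ("Turing", "sm_75")
  else if ["gtx 10", "1080", "1070", "1060", "1050"].any (fun x => PySem.Str.isIn x nl) then ("Pascal", "sm_61")
  else if ["tesla v100"].any (fun x => PySem.Str.isIn x nl) then ("Volta", "sm_70")
  else if ["tesla p100"].any (fun x => PySem.Str.isIn x nl) then ("Pascal", "sm_60")
  else if ["tesla k80", "tesla k40"].any (fun x => PySem.Str.isIn x nl) then ("Kepler", "sm_37")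
  else if ["h100", "a100"].any (fun x => PySem.Str.isIn x nl) then ("Hopper/Ampere", "sm_90")
  else if ["rx 90", "9060", "9070"].any (fun x => PySem.Str.isIn x nl) then ("RDNA 4", "gfx1200")
  else if ["rx 7900", "rx 7800", "rx 7700", "rx 7600"].any (fun x => PySem.Str.isIn x nl) then ("RDNA 3", "gfx1100")
  else if ["rx 6950", "rx 6900", "rx 6800", "rx 6700", "rx 6600", "rx 6500"].any (fun x => PySem.Str.isIn x nl) then ("RDNA 2", "gfx1030")
  else if ["rx 5700", "rx 5600", "rx 5500"].any (fun x => PySem.Str.isIn x nl) then ("RDNA", "gfx1010")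
  else if ["vega 64", "vega 56", "radeon vii"].any (fun x => PySem.Str.isIn x nl) then ("GCN 5.0", "gfx900")
  else if ["arc b", "b770", "b750", "b580", "b380"].any (fun x => PySem.Str.isIn x nl) then ("Xe-HPG", "DG3")
  else if ["arc a770", "arc a750", "arc a580"].any (fun x => PySem.Str.isIn x nl) then ("Xe-HPG", "DG2")
  else if ["arc a380", "arc a310"].any (fun x => PySem.Str.isIn x nl) then ("Xe-HPG", "DG2")
  else if PySem.Str.isIn "iris xe" nl then ("Xe-LP", "Gen12")
  else ("Unknown", "unknown")

-- ===== PORT B =====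
def pvFlatPatterns : List (String × String × String) :=
  [ ("rtx 50", "Blackwell", "sm_90"), ("5090", "Blackwell", "sm_90"),
    ("5080", "Blackwell", "sm_90"), ("5070", "Blackwell", "sm_90"),
    ("5060", "Blackwell", "sm_90"),
    ("rtx 40", "Ada Lovelace", "sm_89"), ("4090", "Ada Lovelace", "sm_89"),
    ("4080", "Ada Lovelace", "sm_89"), ("4070", "Ada Lovelace", "sm_89"),
    ("4060", "Ada Lovelace", "sm_89"),
    ("rtx 30", "Ampere", "sm_86"), ("3090", "Ampere", "sm_86"),
    ("3080", "Ampere", "sm_86"), ("3070", "Ampere", "sm_86"),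
    ("3060", "Ampere", "sm_86"),
    ("rtx 20", "Turing", "sm_75"), ("2080", "Turing", "sm_75"),
    ("2070", "Turing", "sm_75"), ("2060", "Turing", "sm_75"),
    ("titan rtx", "Turing", "sm_75"),
    ("gtx 16", "Turing", "sm_75"), ("1660", "Turing", "sm_75"),
    ("1650", "Turing", "sm_75"),
    ("gtx 10", "Pascal", "sm_61"), ("1080", "Pascal", "sm_61"),
    ("1070", "Pascal", "sm_61"), ("1060", "Pascal", "sm_61"),
    ("1050", "Pascal", "sm_61"),
    ("tesla v100", "Volta", "sm_70"),
    ("tesla p100", "Pascal", "sm_60"),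
    ("tesla k80", "Kepler", "sm_37"), ("tesla k40", "Kepler", "sm_37"),
    ("h100", "Hopper/Ampere", "sm_90"), ("a100", "Hopper/Ampere", "sm_90"),
    ("rx 90", "RDNA 4", "gfx1200"), ("9060", "RDNA 4", "gfx1200"),
    ("9070", "RDNA 4", "gfx1200"),
    ("rx 7900", "RDNA 3", "gfx1100"), ("rx 7800", "RDNA 3", "gfx1100"),
    ("rx 7700", "RDNA 3", "gfx1100"), ("rx 7600", "RDNA 3", "gfx1100"),
    ("rx 6950", "RDNA 2", "gfx1030"), ("rx 6900", "RDNA 2", "gfx1030"),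
    ("rx 6800", "RDNA 2", "gfx1030"), ("rx 6700", "RDNA 2", "gfx1030"),
    ("rx 6600", "RDNA 2", "gfx1030"), ("rx 6500", "RDNA 2", "gfx1030"),
    ("rx 5700", "RDNA", "gfx1010"), ("rx 5600", "RDNA", "gfx1010"),
    ("rx 5500", "RDNA", "gfx1010"),
    ("vega 64", "GCN 5.0", "gfx900"), ("vega 56", "GCN 5.0", "gfx900"),
    ("radeon vii", "GCN 5.0", "gfx900"),
    ("arc b", "Xe-HPG", "DG3"), ("b770", "Xe-HPG", "DG3"),
    ("b750", "Xe-HPG", "DG3"), ("b580", "Xe-HPG", "DG3"),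
    ("b380", "Xe-HPG", "DG3"),
    ("arc a770", "Xe-HPG", "DG2"), ("arc a750", "Xe-HPG", "DG2"),
    ("arc a580", "Xe-HPG", "DG2"),
    ("arc a380", "Xe-HPG", "DG2"), ("arc a310", "Xe-HPG", "DG2"),
    ("iris xe", "Xe-LP", "Gen12") ]

def get_gpu_architecture_py_alt (gpu_name : String) : String × String :=
  let name := PySem.Str.lower gpu_name
  let ms :=
    ((PySem.List.enumerate pvFlatPatterns).filter
        (fun e => PySem.Str.isIn e.2.1 name)).map (fun e => (e.1, e.2.2))
  if ms = [] then ("Unknown", "unknown")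
  else
    match PySem.List.min? ms (fun m => m.1) with
    | some m => m.2
    | none => ("Unknown", "unknown")

-- ===== PRECONDITION & SPEC =====
def Spec_get_gpu_architecture_py (gpu_name : String) (out : String × String) : Prop := out = get_gpu_architecture_py_alt gpu_name
instance (gpu_name : String) (out : String × String) : Decidable (Spec_get_gpu_architecture_py gpu_name out) := by unfold Spec_get_gpu_architecture_py; infer_instance

-- ===== CLAIM =====
def Claim_equal_get_gpu_architecture_py : Prop := ∀ (gpu_name : String), Dom_get_gpu_architecture_py gpu_name → Spec_get_gpu_architecture_py gpu_name (get_gpu_architecture_py gpu_name)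

-- ===== LEMMAS AND PROOFS =====

-- the body of B's "if not ms … min(ms)" tail, generalized over the start rank
def pvRhs (nl : String) (s : Int) (l : List (String × String × String)) : String × String :=
  let ms :=
    ((PySem.List.enumerate l s).filter
        (fun e => PySem.Str.isIn e.2.1 nl)).map (fun e => (e.1, e.2.2))
  if ms = [] then ("Unknown", "unknown")
  else
    match PySem.List.min? ms (fun m => m.1) with
    | some m => m.2
    | none => ("Unknown", "unknown")

theorem pv_min?_cons_head {α : Type} : ∀ (t : List (Int × α)) (x : Int × α),
    (∀ y ∈ t, ¬ (y.1 < x.1)) → PySem.List.min? (x :: t) (fun m => m.1) = some x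
  | [], _, _ => rfl
  | y :: t, x, h => by
      have h1 : ¬ (y.1 < x.1) := h y (by simp)
      have ih := pv_min?_cons_head t x (fun z hz => h z (by simp [hz]))
      simp only [PySem.List.min?, List.foldl_cons] at ih ⊢
      rw [if_neg h1]
      exact ih

theorem pv_min?_eq_head {α : Type} (l : List (Int × α))
    (h : l.Pairwise (fun a b => a.1 < b.1)) :
    PySem.List.min? l (fun m => m.1) = l.head? := by
  cases l with
  | nil => rfl
  | cons x t =>
      rw [List.head?_cons]
      exact pv_min?_cons_head t x (by
        intro y hy
        have := (List.pairwise_cons.mp h).1 y hy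
        omega)

theorem pvRhs_nil (nl : String) (s : Int) : pvRhs nl s [] = ("Unknown", "unknown") := by simp [pvRhs, PySem.List.enumerate]

theorem pvRhs_cons (nl : String) (s : Int) (a : String × String × String)
    (l : List (String × String × String)) :
    pvRhs nl s (a :: l) =
      if PySem.Str.isIn a.1 nl = true then a.2 else pvRhs nl (s + 1) l := by
  unfold pvRhs
  rw [PySem.List.enumerate_cons]
  by_cases h : PySem.Str.isIn a.1 nl = true
  · simp only [List.filter_cons, h, if_pos, List.map_cons]
    have hp : (((s, a) :: (PySem.List.enumerate l (s + 1)).filter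
          (fun e => PySem.Str.isIn e.2.1 nl)).map (fun e => (e.1, e.2.2))).Pairwise
        (fun p q => p.1 < q.1) := by
      rw [List.pairwise_map]
      have : ((s, a) :: PySem.List.enumerate l (s + 1)).Pairwise
          (fun p q : Int × (String × String × String) => p.1 < q.1) := by
        rw [← PySem.List.enumerate_cons]
        exact PySem.List.pairwise_lt_enumerate _ _
      exact this.sublist (List.filter_sublist.cons₂ _)
    rw [List.map_cons] at hp
    rw [pv_min?_eq_head _ hp]
    simp
  · simp only [List.filter_cons, h]
    simp

theorem pv_alt_eq_rhs (g : String) :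
    get_gpu_architecture_py_alt g = pvRhs (PySem.Str.lower g) 0 pvFlatPatterns := rfl

theorem pv_if_or {α : Type} (a b : Bool) (x y : α) :
    (if (a || b) = true then x else y) = if a = true then x else (if b = true then x else y) := by
  cases a <;> simp

-- ===== VERDICT =====
theorem get_gpu_architecture_py_spec : Claim_equal_get_gpu_architecture_py := by
  intro g _
  unfold Spec_get_gpu_architecture_py
  rw [pv_alt_eq_rhs]
  unfold get_gpu_architecture_py pvFlatPatterns
  simp only [List.any_cons, List.any_nil, Bool.or_false, pv_if_or,
    pvRhs_cons, pvRhs_nil]
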